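-- pv_equiv track=rewrite | github.com/Shubham619/Case-Study-in-HR-analytics-Rmarkdown | all_file.py | bitswap32
-- ===== SOURCE A (Python) =====
-- def u32(x: int) -> int:
--     """Return x as a 32‑bit unsigned value."""
--     return x & 0xFFFFFFFF
--
-- def rotl32(x: int, r: int) -> int:
--     """Rotate a 32‑bit integer left by r bits."""
--     r &= 31
--     return u32((x << r) | (x >> (32 - r)))
--
-- def bitswap32(x: int, mode: int) -> int:
--     """
--     Deterministic "bit permutation" family (cheap, stdlib‑only).
--
--     mode 0: identity
--     mode 1: reverse bits
--     mode 2: swap nibbles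
--     mode 3: rotate 13
--     mode 4: xor‑fold
--     """
--     x = u32(x)
--     if mode == 0:
--         return x
--     if mode == 1:
--         # reverse bits
--         y = 0
--         for i in range(32):
--             y = (y << 1) | ((x >> i) & 1)
--         return u32(y)
--     if mode == 2:
--         # swap nibbles
--         y = 0
--         for i in range(8):
--             nib = (x >> (i * 4)) & 0xF
--             y |= nib << ((7 - i) * 4)
--         return u32(y)
--     if mode == 3:
--         return rotl32(x, 13)
--     # mode 4
--     y = x ^ (x >> 16)
--     y = u32(y ^ (y >> 8))
--     return y
-- ===== SOURCE B (Python) =====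
-- def _rev(x, k, w):
--     """Reverse the order of the k low w-bit digits of x, divide and conquer."""
--     if k <= 1:
--         return x & ((1 << w) - 1)
--     h = k >> 1
--     return (_rev(x, h, w) << (w * h)) + _rev(x >> (w * h), h, w)
--
-- def bitswap32(x, mode):
--     x &= 0xFFFFFFFF
--     if mode == 0:
--         return x
--     if mode == 1:
--         return _rev(x, 32, 1)   # reverse bits = reverse the 32 one-bit digits
--     if mode == 2:
--         return _rev(x, 8, 4)    # swap nibbles = reverse the 8 four-bit digits
--     if mode == 3:
--         return ((x << 13) | (x >> 19)) & 0xFFFFFFFF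
--     y = x ^ (x >> 16)
--     return (y ^ (y >> 8)) & 0xFFFFFFFF
-- ===== Notes on version B (the rewrite author's own statement) =====
-- stated objective: alternative
-- what changed: A's two iterative accumulation loops (32 shift-and-or steps for bit reversal, 8 nibble-placement steps for nibble swap) are replaced by a single divide-and-conquer digit-reversal recursion _rev(x, k, w) that splits the word in halves (O(log k) levels); the trivial modes 0, 3 and 4 stay single expressions.
import Mathlib
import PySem

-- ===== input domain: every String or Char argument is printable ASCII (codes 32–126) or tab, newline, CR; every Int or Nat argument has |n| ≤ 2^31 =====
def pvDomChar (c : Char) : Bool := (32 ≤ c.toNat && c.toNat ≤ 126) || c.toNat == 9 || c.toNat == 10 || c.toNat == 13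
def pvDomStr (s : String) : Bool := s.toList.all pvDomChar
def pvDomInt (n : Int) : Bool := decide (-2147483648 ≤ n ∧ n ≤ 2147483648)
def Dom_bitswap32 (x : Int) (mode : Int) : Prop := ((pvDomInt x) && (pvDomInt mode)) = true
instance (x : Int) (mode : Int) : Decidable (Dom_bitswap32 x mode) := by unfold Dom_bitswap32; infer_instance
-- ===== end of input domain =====

-- B replaces A's two per-bit/per-nibble accumulation loops (modes 1 and 2) by one
-- divide-and-conquer digit-reversal recursion; modes 0, 3, 4 are single expressions in both.

-- ===== PORT A =====
def pvU32 (x : Int) : Int := PySem.Int.band x 4294967295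

-- Python shift counts are Nats here; in rotl32, r & 31 is in [0, 31], so .toNat is exact
def pvRotl32 (x : Int) (r : Int) : Int :=
  let r2 := PySem.Int.band r 31
  pvU32 (PySem.Int.bor (x <<< r2.toNat) (x >>> (32 - r2).toNat))

def bitswap32 (x : Int) (mode : Int) : Int :=
  let x := pvU32 x
  if mode = 0 then x
  else if mode = 1 then
    pvU32 ((PySem.List.pyRange 0 32 1).foldl
      (fun y i => PySem.Int.bor (y <<< (1 : Nat)) (PySem.Int.band (x >>> i.toNat) 1)) 0)
  else if mode = 2 then
    pvU32 ((PySem.List.pyRange 0 8 1).foldl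
      (fun y i => PySem.Int.bor y
        ((PySem.Int.band (x >>> (i * 4).toNat) 15) <<< ((7 - i) * 4).toNat)) 0)
  else if mode = 3 then pvRotl32 x 13
  else
    let y := PySem.Int.bxor x (x >>> (16 : Nat))
    pvU32 (PySem.Int.bxor y (y >>> (8 : Nat)))

-- ===== PORT B =====
-- _rev(x, k, w): reverse the order of the k low w-bit digits of x, divide and conquer
def pvRev (x : Int) (k : Nat) (w : Nat) : Int :=
  if k ≤ 1 then PySem.Int.band x ((1 <<< w) - 1)
  else
    let h := k >>> 1
    (pvRev x h w) <<< (w * h) + pvRev (x >>> (w * h)) h w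
termination_by k
decreasing_by all_goals (simp only [Nat.shiftRight_one]; omega)

def bitswap32_alt (x : Int) (mode : Int) : Int :=
  let x := PySem.Int.band x 4294967295
  if mode = 0 then x
  else if mode = 1 then pvRev x 32 1
  else if mode = 2 then pvRev x 8 4
  else if mode = 3 then
    PySem.Int.band (PySem.Int.bor (x <<< (13 : Nat)) (x >>> (19 : Nat))) 4294967295
  else
    let y := PySem.Int.bxor x (x >>> (16 : Nat))
    PySem.Int.band (PySem.Int.bxor y (y >>> (8 : Nat))) 4294967295

-- ===== PRECONDITION & SPEC =====
def Spec_bitswap32 (x : Int) (mode : Int) (out : Int) : Prop := out = bitswap32_alt x mode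
instance (x : Int) (mode : Int) (out : Int) : Decidable (Spec_bitswap32 x mode out) := by unfold Spec_bitswap32; infer_instance

-- ===== CLAIM (what is proved, stated in full; the proofs are below) =====
def Claim_equal_bitswap32 : Prop := ∀ (x : Int) (mode : Int), Dom_bitswap32 x mode → Spec_bitswap32 x mode (bitswap32 x mode)

-- ===== LEMMAS AND PROOFS =====

-- digit i (w bits wide) of n
def pvDig (w n i : Nat) : Nat := (n >>> (w * i)) &&& (2 ^ w - 1)

-- reversal of the k low w-bit digits of n
def pvRd (w : Nat) : Nat → Nat → Nat
  | 0, _ => 0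
  | k + 1, n => 2 ^ w * pvRd w k n + pvDig w n k

-- cast bridges for Lean's Int-by-Nat shifts on nonnegative values (definitional)
theorem pvShrNat (a k : Nat) : ((a : Int) >>> k) = ((a >>> k : Nat) : Int) := rfl
theorem pvShlNat (a k : Nat) : ((a : Int) <<< k) = ((a <<< k : Nat) : Int) := rfl

theorem pvDig_lt (w n i : Nat) : pvDig w n i < 2 ^ w := by
  have h1 : pvDig w n i ≤ 2 ^ w - 1 := Nat.and_le_right
  have h2 : 0 < 2 ^ w := Nat.two_pow_pos w
  omega

theorem pvRd_lt (w k n : Nat) : pvRd w k n < 2 ^ (w * k) := by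
  induction k with
  | zero => simp [pvRd]
  | succ k ih =>
    have hd := pvDig_lt w n k
    calc pvRd w (k + 1) n = 2 ^ w * pvRd w k n + pvDig w n k := rfl
      _ < 2 ^ w * pvRd w k n + 2 ^ w := by omega
      _ = 2 ^ w * (pvRd w k n + 1) := by ring
      _ ≤ 2 ^ w * 2 ^ (w * k) := Nat.mul_le_mul_left _ (by omega)
      _ = 2 ^ (w * (k + 1)) := by rw [← pow_add]; ring_nf

theorem pvRd_one (w n : Nat) : pvRd w 1 n = n &&& (2 ^ w - 1) := by
  simp [pvRd, pvDig]

theorem pvDig_shiftRight (w a n j : Nat) : pvDig w (n >>> (w * a)) j = pvDig w n (a + j) := by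
  simp [pvDig, ← Nat.shiftRight_add, Nat.mul_add]

theorem pvRd_split (w a b n : Nat) :
    pvRd w (a + b) n = pvRd w a n * 2 ^ (w * b) + pvRd w b (n >>> (w * a)) := by
  induction b with
  | zero => simp [pvRd]
  | succ b ih =>
    have h1 : a + (b + 1) = (a + b) + 1 := by omega
    rw [h1]
    show 2 ^ w * pvRd w (a + b) n + pvDig w n (a + b) = _
    rw [ih, ← pvDig_shiftRight w a n b]
    show _ = pvRd w a n * 2 ^ (w * (b + 1)) +
      (2 ^ w * pvRd w b (n >>> (w * a)) + pvDig w (n >>> (w * a)) b)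
    have h2 : (2 : Nat) ^ (w * (b + 1)) = 2 ^ (w * b) * 2 ^ w := by rw [← pow_add]; ring_nf
    rw [h2]; ring

-- B's recursion computes pvRd on powers of two
theorem pvRev_pow (w j n : Nat) : pvRev (↑n) (2 ^ j) w = ↑(pvRd w (2 ^ j) n) := by
  induction j generalizing n with
  | zero =>
    have h1 : (2 : Nat) ^ 0 = 1 := rfl
    rw [h1, pvRev]
    have h2 : (0 : Nat) < 2 ^ w := Nat.two_pow_pos w
    have hc : (((1 <<< w : Nat) : Int)) - 1 = ((2 ^ w - 1 : Nat) : Int) := by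
      rw [Nat.shiftLeft_eq, one_mul]
      push_cast [h2]; ring
    rw [if_pos (by omega), hc, PySem.Int.band_natCast, pvRd_one]
  | succ j ih =>
    rw [pvRev]
    have hk : ¬ (2 ^ (j + 1) ≤ 1) := by
      have : (1 : Nat) < 2 ^ (j + 1) := Nat.one_lt_two_pow_iff.mpr (by omega)
      omega
    have hh : 2 ^ (j + 1) >>> 1 = 2 ^ j := by
      rw [Nat.shiftRight_one, pow_succ]; omega
    rw [if_neg hk]
    simp only [hh]
    rw [pvShrNat, ih, ih, pvShlNat, ← Nat.cast_add]
    congr 1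
    have h2 : 2 ^ (j + 1) = 2 ^ j + 2 ^ j := by rw [pow_succ]; omega
    rw [h2, pvRd_split w (2 ^ j) (2 ^ j) n, Nat.shiftLeft_eq]

-- a Python '&' with a nonnegative right operand is at most that operand
theorem pvBand_le_right (x M : Int) (hM : 0 ≤ M) : PySem.Int.band x M ≤ M := by
  have hA := @Nat.and_le_right x.toNat M.toNat
  have hB := Nat.sub_le M.toNat (M.toNat &&& (-x - 1).toNat)
  rw [PySem.Int.band.eq_1]
  split_ifs <;> omega

theorem pvBand_mask_nonneg (x : Int) : 0 ≤ PySem.Int.band x 4294967295 := by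
  rw [PySem.Int.band_comm]
  exact PySem.Int.band_nonneg_of_nonneg_left x (by norm_num)

-- masking a value already below 2^32 is the identity
theorem pvU32_of_lt (n : Nat) (h : n < 2 ^ 32) : PySem.Int.band (↑n) 4294967295 = (↑n : Int) := by
  have h0 : (4294967295 : Int) = ((4294967295 : Nat) : Int) := by norm_num
  rw [h0, PySem.Int.band_natCast]
  congr 1
  have h1 : (4294967295 : Nat) = 2 ^ 32 - 1 := by norm_num
  rw [h1, Nat.and_two_pow_sub_one_eq_mod]
  exact Nat.mod_eq_of_lt h

-- A's mode-1 loop: invariant over the range prefix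
theorem pvFoldA1 (n m y : Nat) :
    ((List.range m).map (fun k => (Nat.cast k : Int))).foldl
      (fun y i => PySem.Int.bor (y <<< (1 : Nat)) (PySem.Int.band ((↑n : Int) >>> i.toNat) 1)) (↑y)
    = ↑(y * 2 ^ m + pvRd 1 m n) := by
  induction m generalizing y with
  | zero => simp [pvRd]
  | succ m ih =>
    rw [List.range_succ]
    simp only [List.map_append, List.foldl_append]
    rw [ih]
    simp only [List.map_cons, List.map_nil, List.foldl_cons, List.foldl_nil, Int.toNat_natCast]
    have e1 : ((y * 2 ^ m + pvRd 1 m n : Nat) : Int) <<< (1 : Nat)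
        = (((y * 2 ^ m + pvRd 1 m n) <<< 1 : Nat) : Int) := pvShlNat _ 1
    have e2 : ((n : Int) >>> ((m : Nat) : Int)) = ((n >>> m : Nat) : Int) :=
      Int.shiftRight_natCast n m
    have e3 : PySem.Int.band ((n >>> m : Nat) : Int) 1 = ((pvDig 1 n m : Nat) : Int) := by
      have h := PySem.Int.band_natCast (n >>> m) 1
      simp only [Nat.cast_one] at h
      rw [h]
      simp [pvDig]
    rw [e1, e2, e3, PySem.Int.bor_natCast]
    congr 1
    rw [← Nat.shiftLeft_add_eq_or_of_lt (by simpa using pvDig_lt 1 n m)]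
    show (y * 2 ^ m + pvRd 1 m n) <<< 1 + pvDig 1 n m
      = y * 2 ^ (m + 1) + (2 ^ 1 * pvRd 1 m n + pvDig 1 n m)
    rw [Nat.shiftLeft_eq, pow_succ]; ring

-- A's mode-2 loop: invariant over the range prefix
theorem pvFoldA2 (n : Nat) (m : Nat) (hm : m ≤ 8) :
    ((List.range m).map (fun k => (Nat.cast k : Int))).foldl
      (fun y i => PySem.Int.bor y
        ((PySem.Int.band ((↑n : Int) >>> (i * 4).toNat) 15) <<< ((7 - i) * 4).toNat)) 0
    = ↑(pvRd 4 m n <<< (4 * (8 - m))) := by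
  induction m with
  | zero => simp [pvRd]
  | succ m ih =>
    rw [List.range_succ]
    simp only [List.map_append, List.foldl_append]
    rw [ih (by omega)]
    simp only [List.map_cons, List.map_nil, List.foldl_cons, List.foldl_nil]
    have h4 : (((m : Nat) : Int) * 4).toNat = m * 4 := by
      have : (((m : Nat) : Int) * 4) = ((m * 4 : Nat) : Int) := by push_cast; ring
      rw [this, Int.toNat_natCast]
    have h7 : ((7 - ((m : Nat) : Int)) * 4).toNat = (7 - m) * 4 := by
      have hm7 : ((m : Nat) : Int) ≤ 7 := by exact_mod_cast (by omega : m ≤ 7)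
      have : ((7 - ((m : Nat) : Int)) * 4) = (((7 - m) * 4 : Nat) : Int) := by
        push_cast [Nat.sub_mul]; omega
      rw [this, Int.toNat_natCast]
    rw [h4, h7]
    have e2 : ((n : Int) >>> ((m * 4 : Nat) : Int)) = ((n >>> (m * 4) : Nat) : Int) :=
      Int.shiftRight_natCast n (m * 4)
    have e3 : PySem.Int.band ((n >>> (m * 4) : Nat) : Int) 15 = ((pvDig 4 n m : Nat) : Int) := by
      have h := PySem.Int.band_natCast (n >>> (m * 4)) 15
      simp only [Nat.cast_ofNat] at h
      rw [h]
      simp [pvDig, Nat.mul_comm]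
    have e4 : ((pvDig 4 n m : Nat) : Int) <<< (((7 - m) * 4 : Nat) : Int)
        = ((pvDig 4 n m <<< ((7 - m) * 4) : Nat) : Int) := Int.shiftLeft_natCast _ _
    rw [e2, e3, e4, PySem.Int.bor_natCast]
    congr 1
    obtain ⟨t, ht1, ht2, ht3⟩ : ∃ t, 7 - m = t ∧ 8 - m = t + 1 ∧ 8 - (m + 1) = t :=
      ⟨7 - m, rfl, by omega, by omega⟩
    rw [ht1, ht2, ht3]
    have hlt : pvDig 4 n m <<< (t * 4) < 2 ^ (4 * (t + 1)) := by
      rw [Nat.shiftLeft_eq]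
      have hd : pvDig 4 n m < 2 ^ 4 := pvDig_lt 4 n m
      calc pvDig 4 n m * 2 ^ (t * 4) < 2 ^ 4 * 2 ^ (t * 4) :=
            (Nat.mul_lt_mul_right (Nat.two_pow_pos _)).mpr hd
        _ = 2 ^ (4 * (t + 1)) := by rw [← pow_add]; ring_nf
    rw [← Nat.shiftLeft_add_eq_or_of_lt hlt]
    show pvRd 4 m n <<< (4 * (t + 1)) + pvDig 4 n m <<< (t * 4)
      = (2 ^ 4 * pvRd 4 m n + pvDig 4 n m) <<< (4 * t)
    simp only [Nat.shiftLeft_eq]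
    have hp : (2 : Nat) ^ (4 * (t + 1)) = 2 ^ 4 * 2 ^ (4 * t) := by rw [← pow_add]; ring_nf
    have hp2 : (2 : Nat) ^ (t * 4) = 2 ^ (4 * t) := by ring_nf
    rw [hp, hp2]; ring

theorem pvFoldA1_all (n : Nat) :
    ((List.range 32).map (fun k => (Nat.cast k : Int))).foldl
      (fun y i => PySem.Int.bor (y <<< (1 : Nat)) (PySem.Int.band ((↑n : Int) >>> i.toNat) 1)) 0
    = ↑(pvRd 1 32 n) := by
  have h := pvFoldA1 n 32 0
  simpa using h

theorem pvFoldA2_all (n : Nat) :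
    ((List.range 8).map (fun k => (Nat.cast k : Int))).foldl
      (fun y i => PySem.Int.bor y
        ((PySem.Int.band ((↑n : Int) >>> (i * 4).toNat) 15) <<< ((7 - i) * 4).toNat)) 0
    = ↑(pvRd 4 8 n) := by
  have h := pvFoldA2 n 8 (by omega)
  simpa using h

-- ===== VERDICT (by name: the statement is the Claim_ definition above) =====
theorem bitswap32_spec : Claim_equal_bitswap32 := by
  intro x mode _
  unfold Spec_bitswap32 bitswap32 bitswap32_alt
  simp only [pvU32]
  have hnn : 0 ≤ PySem.Int.band x 4294967295 := pvBand_mask_nonneg x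
  set mx : Int := PySem.Int.band x 4294967295 with hmx
  obtain ⟨n, hn⟩ : ∃ n : Nat, mx = (n : Int) := ⟨mx.toNat, (Int.toNat_of_nonneg hnn).symm⟩
  have hlt : n < 2 ^ 32 := by
    have h := pvBand_le_right x 4294967295 (by norm_num)
    rw [← hmx] at h
    omega
  split_ifs with h0 h1 h2 h3
  · rfl
  · -- mode 1: bit reversal
    have h32 : PySem.List.pyRange 0 32 1 = (List.range 32).map (fun k => (Nat.cast k : Int)) := by
      have := PySem.List.pyRange_zero_natCast 32
      simpa using this
    rw [hn, h32, pvFoldA1_all n]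
    have hb : pvRev (↑n) 32 1 = ↑(pvRd 1 32 n) := by
      have := pvRev_pow 1 5 n
      norm_num at this
      exact this
    rw [hb, pvU32_of_lt _ (by simpa using pvRd_lt 1 32 n)]
  · -- mode 2: nibble reversal
    have h8 : PySem.List.pyRange 0 8 1 = (List.range 8).map (fun k => (Nat.cast k : Int)) := by
      have := PySem.List.pyRange_zero_natCast 8
      simpa using this
    rw [hn, h8, pvFoldA2_all n]
    have hb : pvRev (↑n) 8 4 = ↑(pvRd 4 8 n) := by
      have := pvRev_pow 4 3 n
      norm_num at this
      exact this
    rw [hb, pvU32_of_lt _ (by simpa using pvRd_lt 4 8 n)]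
  · -- mode 3: rotate 13
    have h13 : PySem.Int.band 13 31 = 13 := by decide
    unfold pvRotl32
    rw [h13]
    simp only [pvU32]
    rfl
  · -- mode 4: xor-fold, identical expressions
    rfl
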